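-- pv_equiv track=rewrite | github.com/PlusLabNLP/EventPlus | component/BETTER/joint/generate_data/json_to_pkl_newformat.py | generate_all_candidate_pairs
-- ===== SOURCE A (Python) =====
-- def check_span(gold_start, gold_end, c_start, c_end):
--     if gold_start > c_start:
--         if gold_end <= c_end:
--             # candidate contains gold
--             return True
--         elif gold_end > c_end:
--             return False
--     elif gold_start == c_start:
--         if gold_end >= c_end:
--             # gold contains candidate
--             return True
--         elif gold_end < c_end:
--             # candidate contains gold
--             return True
--     elif gold_start < c_start:
--         if gold_end >= c_end:
--             # gold contains candidate
--             return True
--         elif gold_end < c_end: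
--             return False
--
-- def check_duplicate(all_pairs, current_pair):
--     # if return True means there's duplicate in all_pairs already
--     for p in all_pairs:
--         trigger_flag = check_span(p[0], p[1], current_pair[0], current_pair[1])
--         argument_flag = check_span(p[2], p[3], current_pair[2], current_pair[3])
--         if trigger_flag and argument_flag:
--             return True
--     return False
--
-- def generate_all_candidate_pairs(all_candidates, all_pairs):
--     '''
--     all_candidates is a list of tuple: (start_idx, end_idx)
--     all_pairs is a list of tuple that contains gold trigger argument pairs:
--         [(tri_start, tri_end, arg_start, arg_end, label), (....)]
--
--     output: similar structure like all_pairs, but augument with all_candidates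
--     '''
--     output = list()
--     for i in range(len(all_candidates)):
--         for j in range(len(all_candidates)):
--             if i != j:
--                 current_pair = (all_candidates[i][0], all_candidates[i][1], all_candidates[j][0], all_candidates[j][1])
--                 if not check_duplicate(all_pairs, current_pair):
--                     output.append((all_candidates[i][0], all_candidates[i][1], all_candidates[j][0], all_candidates[j][1], 'None'))
--     return output + all_pairs
-- ===== SOURCE B (Python) =====
-- def _nests(gs, ge, cs, ce):
--     # True unless one span strictly precedes-and-overhangs the other on both ends
--     return not ((gs > cs and ge > ce) or (gs < cs and ge < ce))
--
-- def generate_all_candidate_pairs(all_candidates, all_pairs):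
--     # Precompute, per candidate, bitmasks over the gold pairs: which golds
--     # nest with it as a trigger span / as an argument span.  A pair (i, j) is
--     # a duplicate iff some gold nests both sides, i.e. tm_i & am_j != 0 --
--     # one word-parallel AND instead of rescanning all gold pairs.
--     info = []
--     for cs, ce in all_candidates:
--         tm = 0
--         am = 0
--         for k, (gs, ge, s2, e2, _lbl) in enumerate(all_pairs):
--             if _nests(gs, ge, cs, ce):
--                 tm |= 1 << k
--             if _nests(s2, e2, cs, ce):
--                 am |= 1 << k
--         info.append((cs, ce, tm, am))
--     output = []
--     for i, (cs_i, ce_i, tm_i, _am) in enumerate(info):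
--         for j, (cs_j, ce_j, _tm, am_j) in enumerate(info):
--             if i != j and not (tm_i & am_j):
--                 output.append((cs_i, ce_i, cs_j, ce_j, 'None'))
--     output.extend(all_pairs)
--     return output
-- ===== Notes on version B (the rewrite author's own statement) =====
-- stated objective: faster
-- what changed: Precomputes per-candidate trigger/argument gold-nesting bitmasks once (O(n*m)), so the duplicate test for each ordered candidate pair becomes a single word-parallel bitmask AND instead of rescanning all gold pairs.
import Mathlib
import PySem

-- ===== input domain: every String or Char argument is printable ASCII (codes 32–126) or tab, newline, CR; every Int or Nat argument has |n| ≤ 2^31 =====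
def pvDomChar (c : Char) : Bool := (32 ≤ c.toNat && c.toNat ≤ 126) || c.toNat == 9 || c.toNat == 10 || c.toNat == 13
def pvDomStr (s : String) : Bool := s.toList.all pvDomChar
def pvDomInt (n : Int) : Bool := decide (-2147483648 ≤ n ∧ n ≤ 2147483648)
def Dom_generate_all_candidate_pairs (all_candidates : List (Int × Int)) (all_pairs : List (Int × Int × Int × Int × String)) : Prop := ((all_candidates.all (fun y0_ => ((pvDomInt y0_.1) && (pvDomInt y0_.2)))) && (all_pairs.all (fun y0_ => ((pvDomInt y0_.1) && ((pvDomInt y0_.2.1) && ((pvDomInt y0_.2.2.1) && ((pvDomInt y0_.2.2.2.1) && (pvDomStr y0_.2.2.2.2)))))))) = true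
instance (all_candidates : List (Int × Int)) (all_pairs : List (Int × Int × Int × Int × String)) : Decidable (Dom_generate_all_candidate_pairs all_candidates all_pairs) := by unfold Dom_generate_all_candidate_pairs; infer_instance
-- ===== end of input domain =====

-- B precomputes per-candidate gold-nesting bitmasks once, so each pair's duplicate
-- test is a single bitmask AND instead of rescanning all gold pairs (objective: faster).

-- ===== PORT A =====
def pyCheckSpan (gold_start gold_end c_start c_end : Int) : Bool :=
  if gold_start > c_start then
    (if gold_end ≤ c_end then true else false)
  else if gold_start = c_start then
    (if gold_end ≥ c_end then true else true)
  else  -- gold_start < c_start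
    (if gold_end ≥ c_end then true else false)

def pyCheckDuplicate (all_pairs : List (Int × Int × Int × Int × String))
    (current_pair : Int × Int × Int × Int) : Bool :=
  all_pairs.any (fun p =>
    pyCheckSpan p.1 p.2.1 current_pair.1 current_pair.2.1 &&
    pyCheckSpan p.2.2.1 p.2.2.2.1 current_pair.2.2.1 current_pair.2.2.2)

def generate_all_candidate_pairs (all_candidates : List (Int × Int)) (all_pairs : List (Int × Int × Int × Int × String)) : List (Int × Int × Int × Int × String) :=
  let output : List (Int × Int × Int × Int × String) :=
    (PySem.List.pyRange 0 (PySem.List.len all_candidates) 1).foldl (fun acc i =>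
      (PySem.List.pyRange 0 (PySem.List.len all_candidates) 1).foldl (fun acc2 j =>
        if i ≠ j then
          let ci := PySem.List.pyGetD all_candidates i ((0 : Int), (0 : Int))
          let cj := PySem.List.pyGetD all_candidates j ((0 : Int), (0 : Int))
          if pyCheckDuplicate all_pairs (ci.1, ci.2, cj.1, cj.2) = false then
            acc2 ++ [(ci.1, ci.2, cj.1, cj.2, "None")]
          else acc2
        else acc2) acc) []
  output ++ all_pairs

-- ===== PORT B =====
def pvNests (gs ge cs ce : Int) : Bool :=
  !((decide (gs > cs) && decide (ge > ce)) || (decide (gs < cs) && decide (ge < ce)))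

-- the 'for k, (...) in enumerate(all_pairs)' mask-building loop of Source B
def pvMasksGo (cs ce : Int) (pairs : List (Int × Int × Int × Int × String)) (k tm am : Nat) : Nat × Nat :=
  match pairs with
  | [] => (tm, am)
  | p :: rest =>
      pvMasksGo cs ce rest (k + 1)
        (if pvNests p.1 p.2.1 cs ce then tm ||| (1 <<< k) else tm)
        (if pvNests p.2.2.1 p.2.2.2.1 cs ce then am ||| (1 <<< k) else am)

def pvInfo (all_candidates : List (Int × Int)) (all_pairs : List (Int × Int × Int × Int × String)) : List (Int × Int × Nat × Nat) :=
  all_candidates.map (fun c =>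
    let m := pvMasksGo c.1 c.2 all_pairs 0 0 0
    (c.1, c.2, m.1, m.2))

-- inner 'for j, (...) in enumerate(info)' loop of Source B
def pvInner (i : Nat) (cs_i ce_i : Int) (tm_i : Nat)
    (info : List (Int × Int × Nat × Nat)) (j : Nat)
    (acc : List (Int × Int × Int × Int × String)) : List (Int × Int × Int × Int × String) :=
  match info with
  | [] => acc
  | (cs_j, ce_j, _, am_j) :: rest =>
      pvInner i cs_i ce_i tm_i rest (j + 1)
        (if i ≠ j ∧ tm_i &&& am_j = 0 then acc ++ [(cs_i, ce_i, cs_j, ce_j, "None")] else acc)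

-- outer 'for i, (...) in enumerate(info)' loop of Source B
def pvOuter (full : List (Int × Int × Nat × Nat)) (rem : List (Int × Int × Nat × Nat)) (i : Nat)
    (acc : List (Int × Int × Int × Int × String)) : List (Int × Int × Int × Int × String) :=
  match rem with
  | [] => acc
  | (cs_i, ce_i, tm_i, _) :: rest =>
      pvOuter full rest (i + 1) (pvInner i cs_i ce_i tm_i full 0 acc)

def generate_all_candidate_pairs_alt (all_candidates : List (Int × Int)) (all_pairs : List (Int × Int × Int × Int × String)) : List (Int × Int × Int × Int × String) :=
  let info := pvInfo all_candidates all_pairs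
  let output := pvOuter info info 0 []
  output ++ all_pairs

-- ===== PRECONDITION & SPEC =====
def Spec_generate_all_candidate_pairs (all_candidates : List (Int × Int)) (all_pairs : List (Int × Int × Int × Int × String)) (out : List (Int × Int × Int × Int × String)) : Prop := out = generate_all_candidate_pairs_alt all_candidates all_pairs
instance (all_candidates : List (Int × Int)) (all_pairs : List (Int × Int × Int × Int × String)) (out : List (Int × Int × Int × Int × String)) : Decidable (Spec_generate_all_candidate_pairs all_candidates all_pairs out) := by unfold Spec_generate_all_candidate_pairs; infer_instance

-- ===== CLAIM (what is proved, stated in full; the proofs are below) =====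
def Claim_equal_generate_all_candidate_pairs : Prop := ∀ (all_candidates : List (Int × Int)) (all_pairs : List (Int × Int × Int × Int × String)), Dom_generate_all_candidate_pairs all_candidates all_pairs → Spec_generate_all_candidate_pairs all_candidates all_pairs (generate_all_candidate_pairs all_candidates all_pairs)

-- ===== LEMMAS AND PROOFS =====

-- A's check_span agrees with B's nesting test
lemma checkSpan_eq_nests (gs ge cs ce : Int) :
    pyCheckSpan gs ge cs ce = pvNests gs ge cs ce := by
  unfold pyCheckSpan pvNests
  split_ifs <;> simp_all <;> omega

-- the gold pair k's trigger/argument nesting flag against a candidate (cs, ce)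
def pvTrigBit (pairs : List (Int × Int × Int × Int × String)) (j : Nat) (cs ce : Int) : Bool :=
  match pairs[j]? with
  | some p => pvNests p.1 p.2.1 cs ce
  | none => false

def pvArgBit (pairs : List (Int × Int × Int × Int × String)) (j : Nat) (cs ce : Int) : Bool :=
  match pairs[j]? with
  | some p => pvNests p.2.2.1 p.2.2.2.1 cs ce
  | none => false

lemma masksGo_testBit_lt (cs ce : Int) (pairs : List (Int × Int × Int × Int × String)) :
    ∀ (k tm am i : Nat), i < k →
      ((pvMasksGo cs ce pairs k tm am).1.testBit i = tm.testBit i ∧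
       (pvMasksGo cs ce pairs k tm am).2.testBit i = am.testBit i) := by
  induction pairs with
  | nil => intro k tm am i h; simp [pvMasksGo]
  | cons p rest ih =>
      intro k tm am i h
      have h2 : i < k + 1 := by omega
      have := ih (k + 1) (if pvNests p.1 p.2.1 cs ce then tm ||| (1 <<< k) else tm)
        (if pvNests p.2.2.1 p.2.2.2.1 cs ce then am ||| (1 <<< k) else am) i h2
      simp only [pvMasksGo] at *
      rcases this with ⟨h1', h2'⟩
      constructor
      · rw [h1']; split_ifs <;> simp [Nat.testBit_or, Nat.shiftLeft_eq, Nat.testBit_two_pow] <;> omega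
      · rw [h2']; split_ifs <;> simp [Nat.testBit_or, Nat.shiftLeft_eq, Nat.testBit_two_pow] <;> omega

lemma masksGo_testBit (cs ce : Int) (pairs : List (Int × Int × Int × Int × String)) :
    ∀ (k tm am j : Nat),
      ((pvMasksGo cs ce pairs k tm am).1.testBit (k + j) =
         (tm.testBit (k + j) || pvTrigBit pairs j cs ce) ∧
       (pvMasksGo cs ce pairs k tm am).2.testBit (k + j) =
         (am.testBit (k + j) || pvArgBit pairs j cs ce)) := by
  induction pairs with
  | nil => intro k tm am j; simp [pvMasksGo, pvTrigBit, pvArgBit]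
  | cons p rest ih =>
      intro k tm am j
      cases j with
      | zero =>
          have hlt : k < k + 1 := by omega
          have hl := masksGo_testBit_lt cs ce rest (k + 1)
            (if pvNests p.1 p.2.1 cs ce then tm ||| (1 <<< k) else tm)
            (if pvNests p.2.2.1 p.2.2.2.1 cs ce then am ||| (1 <<< k) else am) k hlt
          simp only [pvMasksGo, pvTrigBit, pvArgBit, List.getElem?_cons_zero, Nat.add_zero]
          rcases hl with ⟨h1, h2⟩
          rw [h1, h2]
          constructor <;>
            (split_ifs with h <;> simp [h, Nat.testBit_or, Nat.shiftLeft_eq])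
      | succ j' =>
          have := ih (k + 1)
            (if pvNests p.1 p.2.1 cs ce then tm ||| (1 <<< k) else tm)
            (if pvNests p.2.2.1 p.2.2.2.1 cs ce then am ||| (1 <<< k) else am) j'
          simp only [pvMasksGo, pvTrigBit, pvArgBit, List.getElem?_cons_succ]
          have hk : k + (j' + 1) = (k + 1) + j' := by omega
          rw [hk]
          rcases this with ⟨h1, h2⟩
          rw [h1, h2]
          have hne : k ≠ k + 1 + j' := by omega
          constructor <;>
            (split_ifs <;> simp [pvTrigBit, pvArgBit, Nat.testBit_or, Nat.shiftLeft_eq, hne])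

lemma masks_testBit₁ (cs ce : Int) (pairs : List (Int × Int × Int × Int × String)) (j : Nat) :
    (pvMasksGo cs ce pairs 0 0 0).1.testBit j = pvTrigBit pairs j cs ce := by
  have := (masksGo_testBit cs ce pairs 0 0 0 j).1
  simpa using this

lemma masks_testBit₂ (cs ce : Int) (pairs : List (Int × Int × Int × Int × String)) (j : Nat) :
    (pvMasksGo cs ce pairs 0 0 0).2.testBit j = pvArgBit pairs j cs ce := by
  have := (masksGo_testBit cs ce pairs 0 0 0 j).2
  simpa using this

lemma and_eq_zero_iff_testBit (m n : Nat) :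
    m &&& n = 0 ↔ ∀ j, ¬(m.testBit j = true ∧ n.testBit j = true) := by
  constructor
  · intro h j ⟨h1, h2⟩
    have : (m &&& n).testBit j = true := by simp [Nat.testBit_and, h1, h2]
    rw [h] at this
    simp at this
  · intro h
    apply Nat.eq_of_testBit_eq
    intro j
    have := h j
    simp only [Nat.testBit_and, Nat.zero_testBit]
    rcases Bool.eq_false_or_eq_true (m.testBit j) with h1 | h1 <;>
      rcases Bool.eq_false_or_eq_true (n.testBit j) with h2 | h2 <;> simp_all

-- duplicate test ↔ bitmask AND
lemma dup_iff_masks (pairs : List (Int × Int × Int × Int × String)) (ci cj : Int × Int) :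
    pyCheckDuplicate pairs (ci.1, ci.2, cj.1, cj.2) = false ↔
      (pvMasksGo ci.1 ci.2 pairs 0 0 0).1 &&& (pvMasksGo cj.1 cj.2 pairs 0 0 0).2 = 0 := by
  rw [and_eq_zero_iff_testBit]
  constructor
  · intro h j ⟨h1, h2⟩
    rw [masks_testBit₁] at h1
    rw [masks_testBit₂] at h2
    unfold pvTrigBit at h1
    unfold pvArgBit at h2
    cases hp : pairs[j]? with
    | none => rw [hp] at h1; simp at h1
    | some p =>
        rw [hp] at h1 h2
        have hmem : p ∈ pairs := List.mem_of_getElem? hp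
        have : pyCheckDuplicate pairs (ci.1, ci.2, cj.1, cj.2) = true := by
          unfold pyCheckDuplicate
          rw [List.any_eq_true]
          exact ⟨p, hmem, by rw [checkSpan_eq_nests, checkSpan_eq_nests]; simp [h1, h2]⟩
        rw [h] at this; simp at this
  · intro h
    by_contra hne
    have htrue : pyCheckDuplicate pairs (ci.1, ci.2, cj.1, cj.2) = true := by
      cases hb : pyCheckDuplicate pairs (ci.1, ci.2, cj.1, cj.2) <;> simp_all
    unfold pyCheckDuplicate at htrue
    rw [List.any_eq_true] at htrue
    obtain ⟨p, hmem, hflags⟩ := htrue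
    obtain ⟨j, hj, hpj⟩ := List.getElem_of_mem hmem
    rw [Bool.and_eq_true, checkSpan_eq_nests, checkSpan_eq_nests] at hflags
    apply h j
    constructor
    · rw [masks_testBit₁]; unfold pvTrigBit
      rw [List.getElem?_eq_getElem hj, hpj]; exact hflags.1
    · rw [masks_testBit₂]; unfold pvArgBit
      rw [List.getElem?_eq_getElem hj, hpj]; exact hflags.2

-- bridge: an index loop 'for j in range(len(xs)): … xs[j] …' is a fold over enumerate
lemma pyfold_eq_enum {α β : Type} (xs : List α) (d : α) (F : β → Int → α → β) (init : β) :
    (PySem.List.pyRange 0 (PySem.List.len xs) 1).foldl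
        (fun acc j => F acc j (PySem.List.pyGetD xs j d)) init
      = (PySem.List.enumerate xs 0).foldl (fun acc p => F acc p.1 p.2) init := by
  rw [PySem.List.enumerate_eq_map_pyRange xs d, List.foldl_map]

-- inner loop equivalence
lemma inner_eq (pairs : List (Int × Int × Int × Int × String)) (ci : Int × Int) (iN : Nat) :
    ∀ (rem : List (Int × Int)) (s : Int) (jN : Nat), s = (jN : Int) →
    ∀ (acc : List (Int × Int × Int × Int × String)),
      (PySem.List.enumerate rem s).foldl (fun acc2 p =>
          if (iN : Int) ≠ p.1 then
            (if pyCheckDuplicate pairs (ci.1, ci.2, p.2.1, p.2.2) = false then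
              acc2 ++ [(ci.1, ci.2, p.2.1, p.2.2, "None")]
            else acc2)
          else acc2) acc
        = pvInner iN ci.1 ci.2 ((pvMasksGo ci.1 ci.2 pairs 0 0 0).1) (pvInfo rem pairs) jN acc := by
  intro rem
  induction rem with
  | nil => intro s jN hs acc; simp [PySem.List.enumerate_nil, pvInfo, pvInner]
  | cons c rest ih =>
      intro s jN hs acc
      rw [PySem.List.enumerate_cons, List.foldl_cons]
      simp only [pvInfo, List.map_cons]
      rw [show (pvInner iN ci.1 ci.2 ((pvMasksGo ci.1 ci.2 pairs 0 0 0).1)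
          ((c.1, c.2, (pvMasksGo c.1 c.2 pairs 0 0 0).1, (pvMasksGo c.1 c.2 pairs 0 0 0).2) ::
            List.map (fun c => (c.1, c.2, (pvMasksGo c.1 c.2 pairs 0 0 0).1, (pvMasksGo c.1 c.2 pairs 0 0 0).2)) rest) jN acc)
        = pvInner iN ci.1 ci.2 ((pvMasksGo ci.1 ci.2 pairs 0 0 0).1)
            (List.map (fun c => (c.1, c.2, (pvMasksGo c.1 c.2 pairs 0 0 0).1, (pvMasksGo c.1 c.2 pairs 0 0 0).2)) rest) (jN + 1)
            (if iN ≠ jN ∧ (pvMasksGo ci.1 ci.2 pairs 0 0 0).1 &&& (pvMasksGo c.1 c.2 pairs 0 0 0).2 = 0 then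
              acc ++ [(ci.1, ci.2, c.1, c.2, "None")] else acc) from rfl]
      have hcond : ((iN : Int) ≠ s) ↔ (iN ≠ jN) := by subst hs; simp
      have := ih (s + 1) (jN + 1) (by omega) (if iN ≠ jN ∧ (pvMasksGo ci.1 ci.2 pairs 0 0 0).1 &&& (pvMasksGo c.1 c.2 pairs 0 0 0).2 = 0 then
              acc ++ [(ci.1, ci.2, c.1, c.2, "None")] else acc)
      rw [show pvInfo rest pairs = List.map (fun c => (c.1, c.2, (pvMasksGo c.1 c.2 pairs 0 0 0).1, (pvMasksGo c.1 c.2 pairs 0 0 0).2)) rest from rfl] at this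
      rw [← this]
      congr 1
      by_cases h1 : (iN : Int) ≠ s
      · rw [if_pos h1]
        by_cases h2 : pyCheckDuplicate pairs (ci.1, ci.2, c.1, c.2) = false
        · rw [if_pos h2, if_pos ⟨hcond.mp h1, (dup_iff_masks pairs ci c).mp h2⟩]
        · rw [if_neg h2, if_neg]
          rintro ⟨-, hm⟩
          exact h2 ((dup_iff_masks pairs ci c).mpr hm)
      · rw [if_neg h1, if_neg]
        rintro ⟨hne, -⟩
        exact h1 (hcond.mpr hne)

-- outer loop equivalence
lemma outer_eq (cands : List (Int × Int)) (pairs : List (Int × Int × Int × Int × String)) :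
    ∀ (rem : List (Int × Int)) (s : Int) (iN : Nat), s = (iN : Int) →
    ∀ (acc : List (Int × Int × Int × Int × String)),
      (PySem.List.enumerate rem s).foldl (fun acc p =>
          (PySem.List.pyRange 0 (PySem.List.len cands) 1).foldl (fun acc2 j =>
            if p.1 ≠ j then
              (if pyCheckDuplicate pairs (p.2.1, p.2.2, (PySem.List.pyGetD cands j ((0 : Int), (0 : Int))).1, (PySem.List.pyGetD cands j ((0 : Int), (0 : Int))).2) = false then
                acc2 ++ [(p.2.1, p.2.2, (PySem.List.pyGetD cands j ((0 : Int), (0 : Int))).1, (PySem.List.pyGetD cands j ((0 : Int), (0 : Int))).2, "None")]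
              else acc2)
            else acc2) acc) acc
        = pvOuter (pvInfo cands pairs) (pvInfo rem pairs) iN acc := by
  intro rem
  induction rem with
  | nil => intro s iN hs acc; simp [PySem.List.enumerate_nil, pvInfo, pvOuter]
  | cons c rest ih =>
      intro s iN hs acc
      subst hs
      rw [PySem.List.enumerate_cons, List.foldl_cons]
      have hR : pvOuter (pvInfo cands pairs) (pvInfo (c :: rest) pairs) iN acc
          = pvOuter (pvInfo cands pairs) (pvInfo rest pairs) (iN + 1)
              (pvInner iN c.1 c.2 ((pvMasksGo c.1 c.2 pairs 0 0 0).1) (pvInfo cands pairs) 0 acc) := rfl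
      rw [hR]
      refine Eq.trans (ih ((iN : Int) + 1) (iN + 1) (by push_cast; ring) _) ?_
      congr 1
      exact (pyfold_eq_enum cands ((0 : Int), (0 : Int))
          (fun acc2 j cj =>
            if (iN : Int) ≠ j then
              (if pyCheckDuplicate pairs (c.1, c.2, cj.1, cj.2) = false then
                acc2 ++ [(c.1, c.2, cj.1, cj.2, "None")]
              else acc2)
            else acc2) acc).trans
        (inner_eq pairs c iN cands 0 0 rfl acc)

-- ===== VERDICT (by name: the statement is the Claim_ definition above) =====
theorem generate_all_candidate_pairs_spec : Claim_equal_generate_all_candidate_pairs := by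
  intro cands pairs _
  unfold Spec_generate_all_candidate_pairs generate_all_candidate_pairs generate_all_candidate_pairs_alt
  refine congrArg (· ++ pairs) ?_
  exact (pyfold_eq_enum cands ((0 : Int), (0 : Int))
      (fun acc i ci =>
        (PySem.List.pyRange 0 (PySem.List.len cands) 1).foldl (fun acc2 j =>
          if i ≠ j then
            (if pyCheckDuplicate pairs (ci.1, ci.2, (PySem.List.pyGetD cands j ((0 : Int), (0 : Int))).1, (PySem.List.pyGetD cands j ((0 : Int), (0 : Int))).2) = false then
              acc2 ++ [(ci.1, ci.2, (PySem.List.pyGetD cands j ((0 : Int), (0 : Int))).1, (PySem.List.pyGetD cands j ((0 : Int), (0 : Int))).2, "None")]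
            else acc2)
          else acc2) acc) []).trans
    (outer_eq cands pairs cands 0 0 rfl [])
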